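-- pv_equiv track=rewrite | github.com/AP-MI-2021/lab-3-StroeStefan42 | main.py | get_longest_prime_digits
-- ===== SOURCE A (Python) =====
-- def cifprim(n):
--     while(n!=0):
--         if(n%10!=2 and n%10!=3 and n%10!=5 and n%10!=7):
--             return False
--         n=n//10
--     return True
--
-- def get_longest_prime_digits(lst: list[int]):
--     lst2=[]
--     lstmax=[]
--     nr=0
--     nrmax=-1
--     for i in lst:
--         if cifprim(i)==True:
--             lst2.append(i)
--             nr=nr+1
--             if nr > nrmax:
--                 lstmax=lst2
--                 nrmax=nr
--         if cifprim(i)==False: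
--             nr=0
--             lst2=[]
--     return lstmax
-- ===== SOURCE B (Python) =====
-- def cifprim(n):
--     while(n!=0):
--         if(n%10!=2 and n%10!=3 and n%10!=5 and n%10!=7):
--             return False
--         n=n//10
--     return True
--
-- def get_longest_prime_digits(lst: list[int]):
--     runs = []
--     cur = []
--     for x in lst:
--         if cifprim(x):
--             cur.append(x)
--         else:
--             runs.append(cur)
--             cur = []
--     runs.append(cur)
--     best = []
--     for r in runs:
--         if len(r) > len(best):
--             best = r
--     return best
-- ===== Notes on version B (the rewrite author's own statement) =====
-- stated objective: simpler
-- what changed: Replaces A's single pass with aliased running lists and counters (lst2/lstmax/nr/nrmax) by a group-then-select decomposition: split the list into maximal consecutive prime-digit runs, then keep the first longest run.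
import Mathlib
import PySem

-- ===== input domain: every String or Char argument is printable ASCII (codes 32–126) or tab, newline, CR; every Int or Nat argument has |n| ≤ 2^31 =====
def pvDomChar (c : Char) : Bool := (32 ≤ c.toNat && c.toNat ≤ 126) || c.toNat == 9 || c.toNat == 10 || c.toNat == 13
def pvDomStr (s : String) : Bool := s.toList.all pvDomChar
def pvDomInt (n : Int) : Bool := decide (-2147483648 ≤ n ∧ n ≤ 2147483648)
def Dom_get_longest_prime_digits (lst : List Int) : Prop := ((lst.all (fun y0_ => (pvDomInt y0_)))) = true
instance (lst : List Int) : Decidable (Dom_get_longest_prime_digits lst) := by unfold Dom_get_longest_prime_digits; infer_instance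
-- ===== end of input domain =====

-- B replaces A's aliasing running-counter pass by a plain group-then-select decomposition
-- (collect the maximal consecutive prime-digit runs, then take the first longest); objective: simpler.
-- A's Python aliasing (lstmax = lst2, then lst2 mutated) is value-semantically unobservable here,
-- because every append within a winning run re-triggers the nr > nrmax update; the port below is exact.

-- termination measure lemma for cifprim, cited by name in decreasing_by
theorem cifprim_dec (n : Int) (h0 : ¬ n = 0)
    (hm : ¬(PySem.Int.mod n 10 ≠ 2 ∧ PySem.Int.mod n 10 ≠ 3 ∧ PySem.Int.mod n 10 ≠ 5 ∧ PySem.Int.mod n 10 ≠ 7)) :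
    (PySem.Int.floordiv n 10).natAbs < n.natAbs := by
  have hfd : PySem.Int.floordiv n 10 = n / 10 := PySem.Int.floordiv_eq_ediv_of_pos (by omega)
  have hmd : PySem.Int.mod n 10 = n % 10 := PySem.Int.mod_eq_emod_of_pos (by omega)
  rw [hfd]
  rw [hmd] at hm
  omega

-- shared helper, identical in Source A and Source B (its 0 → True behaviour is kept as written)
def cifprim (n : Int) : Bool :=
  if h0 : n = 0 then true
  else if hm : PySem.Int.mod n 10 ≠ 2 ∧ PySem.Int.mod n 10 ≠ 3 ∧ PySem.Int.mod n 10 ≠ 5 ∧ PySem.Int.mod n 10 ≠ 7 then false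
  else cifprim (PySem.Int.floordiv n 10)
termination_by n.natAbs
decreasing_by exact cifprim_dec n h0 hm

-- ===== PORT A =====
-- loop body of A, factored as a helper: state (lst2, lstmax, nr, nrmax); two sequential ifs as in Python
def stepA (s : List Int × List Int × Int × Int) (i : Int) : List Int × List Int × Int × Int :=
  match s with
  | (lst2, lstmax, nr, nrmax) =>
    let t :=
      if cifprim i = true then
        let lst2' := lst2 ++ [i]
        let nr' := nr + 1
        if nr' > nrmax then (lst2', lst2', nr', nr') else (lst2', lstmax, nr', nrmax)
      else (lst2, lstmax, nr, nrmax)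
    if cifprim i = false then (([] : List Int), t.2.1, (0 : Int), t.2.2.2) else t

def get_longest_prime_digits (lst : List Int) : List Int :=
  (lst.foldl stepA ([], [], 0, -1)).2.1

-- ===== PORT B =====
-- B's first loop body: split into maximal consecutive prime-digit runs (state: finished runs, current run)
def stepB (s : List (List Int) × List Int) (x : Int) : List (List Int) × List Int :=
  if cifprim x then (s.1, s.2 ++ [x]) else (s.1 ++ [s.2], ([] : List Int))

-- B's second loop body: keep the first longest run
def pickB (best r : List Int) : List Int := if r.length > best.length then r else best

def get_longest_prime_digits_alt (lst : List Int) : List Int :=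
  let p := lst.foldl stepB ([], [])
  let runs := p.1 ++ [p.2]
  runs.foldl pickB []

-- ===== PRECONDITION & SPEC =====
def Spec_get_longest_prime_digits (lst : List Int) (out : List Int) : Prop := out = get_longest_prime_digits_alt lst
instance (lst : List Int) (out : List Int) : Decidable (Spec_get_longest_prime_digits lst out) := by unfold Spec_get_longest_prime_digits; infer_instance

-- ===== CLAIM (what is proved, stated in full; the proofs are below) =====
def Claim_equal_get_longest_prime_digits : Prop := ∀ (lst : List Int), Dom_get_longest_prime_digits lst → Spec_get_longest_prime_digits lst (get_longest_prime_digits lst)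

-- ===== LEMMAS AND PROOFS =====

theorem pickB_nil (b : List Int) : pickB b [] = b := by simp [pickB]

theorem foldl_pickB_append (rs : List (List Int)) (c : List Int) :
    (rs ++ [c]).foldl pickB [] = pickB (rs.foldl pickB []) c := by
  simp [List.foldl_append]

-- main invariant lemma: A's fold state tracks B's (runs, current-run) split,
-- with lstmax = first longest so far and nrmax its length (or -1 before any prime-digit element)
theorem mainA (l : List Int) : ∀ (rs : List (List Int)) (cur lstmax : List Int) (nrmax : Int),
    ((nrmax = -1 ∧ lstmax = []) ∨ (nrmax = (lstmax.length : Int) ∧ lstmax ≠ [])) →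
    lstmax = pickB (rs.foldl pickB []) cur →
    (l.foldl stepA (cur, lstmax, (cur.length : Int), nrmax)).2.1
      = pickB ((l.foldl stepB (rs, cur)).1.foldl pickB []) (l.foldl stepB (rs, cur)).2 := by
  induction l with
  | nil => intro rs cur lstmax nrmax _ h2; simp only [List.foldl_nil]; exact h2
  | cons i l ih =>
    intro rs cur lstmax nrmax hinv heq
    by_cases hc : cifprim i = true
    · -- prime-digit element: the current run grows
      have hA : stepA (cur, lstmax, (cur.length : Int), nrmax) i
          = (if (cur.length : Int) + 1 > nrmax
             then (cur ++ [i], cur ++ [i], (cur.length : Int) + 1, (cur.length : Int) + 1)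
             else (cur ++ [i], lstmax, (cur.length : Int) + 1, nrmax)) := by
        simp [stepA, hc]
      have hB : stepB (rs, cur) i = (rs, cur ++ [i]) := by simp [stepB, hc]
      set bp := rs.foldl pickB [] with hbp
      by_cases hcond : (cur.length : Int) + 1 > nrmax
      · -- the grown run becomes the (new) first longest
        have hble : bp.length ≤ cur.length := by
          rcases hinv with ⟨hn, hl⟩ | ⟨hn, hl⟩
          · subst hl
            unfold pickB at heq
            split at heq
            · rename_i hlt
              have := congrArg List.length heq
              simp at this
              omega
            · rename_i hlt
              have := congrArg List.length heq
              simp at this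
              omega
          · subst hn
            unfold pickB at heq
            split at heq
            · rename_i hlt
              have := congrArg List.length heq
              omega
            · rename_i hlt
              have := congrArg List.length heq
              omega
        have hnew : cur ++ [i] = pickB bp (cur ++ [i]) := by
          unfold pickB
          rw [if_pos (by simp; omega)]
        simp only [List.foldl_cons, hA, hB, if_pos hcond]
        rw [show ((cur.length : Int) + 1) = ((cur ++ [i]).length : Int) by simp]
        exact ih rs (cur ++ [i]) (cur ++ [i]) _
          (Or.inr ⟨by simp, by simp⟩) hnew
      · -- run does not beat the record: lstmax stays, and equals pickB bp (cur ++ [i])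
        have hn : nrmax = (lstmax.length : Int) := by
          rcases hinv with ⟨hn, hl⟩ | ⟨hn, hl⟩
          · omega
          · exact hn
        have hkeep : lstmax = pickB bp (cur ++ [i]) := by
          unfold pickB at heq ⊢
          split at heq
          · rename_i hlt
            have := congrArg List.length heq
            omega
          · rename_i hlt
            rw [if_neg (by
              have := congrArg List.length heq
              simp only [List.length_append, List.length_cons, List.length_nil]
              omega)]
            exact heq
        have hinv' : (nrmax = -1 ∧ lstmax = []) ∨ (nrmax = (lstmax.length : Int) ∧ lstmax ≠ []) := by
          rcases hinv with ⟨hn', hl⟩ | h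
          · exfalso; omega
          · exact Or.inr h
        simp only [List.foldl_cons, hA, hB, if_neg hcond]
        rw [show ((cur.length : Int) + 1) = ((cur ++ [i]).length : Int) by simp]
        exact ih rs (cur ++ [i]) lstmax nrmax hinv' hkeep
    · -- non-prime-digit element: the current run is closed
      have hc' : cifprim i = false := by simpa using hc
      have hA : stepA (cur, lstmax, (cur.length : Int), nrmax)  i
          = (([] : List Int), lstmax, (0 : Int), nrmax) := by
        simp [stepA, hc']
      have hB : stepB (rs, cur) i = (rs ++ [cur], ([] : List Int)) := by
        simp [stepB, hc']
      have heq' : lstmax = pickB ((rs ++ [cur]).foldl pickB []) ([] : List Int) := by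
        rw [pickB_nil, foldl_pickB_append]; exact heq
      simp only [List.foldl_cons, hA, hB]
      rw [show (0 : Int) = (([] : List Int).length : Int) by simp]
      exact ih (rs ++ [cur]) [] lstmax nrmax hinv heq'

-- ===== VERDICT (by name: the statement is the Claim_ definition above) =====
theorem get_longest_prime_digits_spec : Claim_equal_get_longest_prime_digits := by
  unfold Claim_equal_get_longest_prime_digits
  intro lst _
  unfold Spec_get_longest_prime_digits get_longest_prime_digits get_longest_prime_digits_alt
  rw [foldl_pickB_append]
  have := mainA lst [] [] [] (-1) (Or.inl ⟨rfl, rfl⟩) (by simp [pickB])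
  simpa using this
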